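-- pv_equiv track=rewrite | github.com/YashDhirajOza/ALGO | 1418C - Mortal Kombat Tower.py | count_skip_points
-- ===== SOURCE A (Python) =====
-- def count_skip_points(test_cases):
--     results = []
--     for case in test_cases:
--         n, a = case
--         ans = 0
--         ans += a[0] == 1  # If the first boss is hard, increment ans
--         i = 1
--         while i < n:
--             if a[i] == 0:
--                 i += 1
--                 continue
--             j = i
--             while j < n and a[j] == 1:
--                 j += 1
--             ans += (j - i) // 3
--             i = j
--         results.append(ans)
--     return results
-- ===== SOURCE B (Python) =====
-- def count_skip_points(test_cases):
--     results = []
--     for n, a in test_cases: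
--         ans = 1 if a[0] == 1 else 0
--         run = 0
--         for k in range(1, n):
--             if a[k] == 1:
--                 run += 1
--             else:
--                 ans += run // 3
--                 run = 0
--         ans += run // 3
--         results.append(ans)
--     return results
-- ===== Notes on version B (the rewrite author's own statement) =====
-- stated objective: simpler
-- what changed: Replaces the two-pointer inner-while grouping over hard-boss runs by a single for-loop maintaining a running counter of consecutive hard bosses, flushed with run//3 at each easy boss and once after the loop.
import Mathlib
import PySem

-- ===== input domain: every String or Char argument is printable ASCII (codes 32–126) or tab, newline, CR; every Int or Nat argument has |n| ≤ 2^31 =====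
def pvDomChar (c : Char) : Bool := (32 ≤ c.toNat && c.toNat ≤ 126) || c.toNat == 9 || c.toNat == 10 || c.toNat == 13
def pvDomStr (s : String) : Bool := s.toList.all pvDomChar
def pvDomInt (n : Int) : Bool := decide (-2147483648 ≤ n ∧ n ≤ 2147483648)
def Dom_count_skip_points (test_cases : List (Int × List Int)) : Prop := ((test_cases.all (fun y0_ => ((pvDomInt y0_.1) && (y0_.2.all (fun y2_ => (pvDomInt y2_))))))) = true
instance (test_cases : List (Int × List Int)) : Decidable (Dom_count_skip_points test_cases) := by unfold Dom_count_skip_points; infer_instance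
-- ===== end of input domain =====

-- B replaces A's two-pointer inner-while grouping by a single loop with a running
-- counter flushed at group boundaries (objective: simpler).

-- ===== PORT A =====
-- a[i] for the indices the admitted inputs reach (0 ≤ i < len a); default 0 only outside Pre_
def pvGet (a : List Int) (i : Int) : Int := (PySem.List.pyGet? a i).getD 0

-- inner 'while j < n and a[j] == 1: j += 1'
def pvScan (a : List Int) (n j : Int) : Int :=
  if h : j < n ∧ pvGet a j = 1 then pvScan a n (j + 1) else j
termination_by (n - j).toNat
decreasing_by omega

-- outer 'while i < n'; fuel only makes the recursion total: inside Pre_ it never runs out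
def pvLoopA (a : List Int) (n : Int) : Nat → Int → Int → Int
  | 0, _, ans => ans
  | fuel + 1, i, ans =>
    if i < n then
      if pvGet a i = 0 then pvLoopA a n fuel (i + 1) ans
      else
        let j := pvScan a n i
        pvLoopA a n fuel j (ans + PySem.Int.floordiv (j - i) 3)
    else ans

def count_skip_points (test_cases : List (Int × List Int)) : List Int :=
  test_cases.foldl (fun results case =>
    let n := case.1
    let a := case.2
    let ans : Int := 0 + (if pvGet a 0 = 1 then 1 else 0)
    results ++ [pvLoopA a n (n.toNat + 1) 1 ans]) []

-- ===== PORT B =====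
def pvStepB (a : List Int) (st : Int × Int) (k : Int) : Int × Int :=
  if pvGet a k = 1 then (st.1, st.2 + 1)
  else (st.1 + PySem.Int.floordiv st.2 3, 0)

def count_skip_points_alt (test_cases : List (Int × List Int)) : List Int :=
  test_cases.foldl (fun results case =>
    let n := case.1
    let a := case.2
    let ans : Int := if pvGet a 0 = 1 then 1 else 0
    let st := (PySem.List.pyRange 1 n 1).foldl (pvStepB a) (ans, 0)
    results ++ [st.1 + PySem.Int.floordiv st.2 3]) []

-- ===== PRECONDITION & SPEC =====
-- Pre_ is exactly where Python A returns: a[0] must exist, every index i < n must be in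
-- range (else IndexError), and a[k] ∈ {0,1} for 1 ≤ k < n (on any other value A's inner
-- while leaves j = i and the outer loop never advances — A diverges).
def Pre_count_skip_points (test_cases : List (Int × List Int)) : Prop :=
  ∀ case ∈ test_cases, case.2 ≠ [] ∧ case.1 ≤ (case.2.length : Int) ∧
    ∀ k ∈ PySem.List.pyRange 1 case.1 1, pvGet case.2 k = 0 ∨ pvGet case.2 k = 1
instance (test_cases : List (Int × List Int)) : Decidable (Pre_count_skip_points test_cases) := by unfold Pre_count_skip_points; infer_instance

def pvWitness_count_skip_points : (List (Int × List Int)) := [(6, [1, 1, 1, 1, 0, 1]), (2, [0, 0, 5])]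

def Spec_count_skip_points (test_cases : List (Int × List Int)) (out : List Int) : Prop := out = count_skip_points_alt test_cases
instance (test_cases : List (Int × List Int)) (out : List Int) : Decidable (Spec_count_skip_points test_cases out) := by unfold Spec_count_skip_points; infer_instance

-- ===== CLAIM (what is proved, stated in full; the proofs are below) =====
def Claim_equal_count_skip_points : Prop := ∀ (test_cases : List (Int × List Int)), Dom_count_skip_points test_cases → Pre_count_skip_points test_cases → Spec_count_skip_points test_cases (count_skip_points test_cases)

-- ===== LEMMAS AND PROOFS =====

theorem pvScan_ge (a : List Int) (n j : Int) : j ≤ pvScan a n j := by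
  unfold pvScan
  split
  · have := pvScan_ge a n (j + 1); omega
  · omega
termination_by (n - j).toNat
decreasing_by omega

theorem pvScan_le (a : List Int) (n j : Int) (h : j ≤ n) : pvScan a n j ≤ n := by
  unfold pvScan
  split
  · exact pvScan_le a n (j + 1) (by omega)
  · omega
termination_by (n - j).toNat
decreasing_by omega

theorem pvScan_ones (a : List Int) (n j : Int) :
    ∀ k, j ≤ k → k < pvScan a n j → pvGet a k = 1 := by
  unfold pvScan
  split
  case isTrue h =>
    intro k hk1 hk2
    by_cases hkj : k = j
    · exact hkj ▸ h.2
    · exact pvScan_ones a n (j + 1) k (by omega) hk2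
  case isFalse h =>
    intro k hk1 hk2; omega
termination_by (n - j).toNat
decreasing_by omega

theorem pvScan_stop (a : List Int) (n j : Int) :
    pvScan a n j < n → pvGet a (pvScan a n j) ≠ 1 := by
  unfold pvScan
  split
  case isTrue h' => exact pvScan_stop a n (j + 1)
  case isFalse h' => intro h hc; exact h' ⟨h, hc⟩
termination_by (n - j).toNat
decreasing_by omega

theorem pvFloordiv_zero : PySem.Int.floordiv 0 3 = 0 := by decide

-- folding pvStepB over a range of all-ones just accumulates the run
theorem foldl_ones (a : List Int) (i j : Int) (hij : i ≤ j)
    (h1 : ∀ k, i ≤ k → k < j → pvGet a k = 1) (ans r : Int) :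
    (PySem.List.pyRange i j 1).foldl (pvStepB a) (ans, r) = (ans, r + (j - i)) := by
  by_cases h : i < j
  · rw [PySem.List.pyRange_one_cons h]
    simp only [List.foldl_cons, pvStepB, h1 i le_rfl h, if_true]
    rw [foldl_ones a (i + 1) j (by omega) (fun k hk1 hk2 => h1 k (by omega) hk2) ans (r + 1)]
    ring_nf
  · have hji : j = i := le_antisymm (by omega) hij
    rw [hji, PySem.List.pyRange_one_eq_nil le_rfl]
    simp
termination_by (j - i).toNat
decreasing_by omega

-- main loop equivalence: A's two-pointer loop from index i equals B's flushed counter fold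
theorem loop_eq (a : List Int) (n : Int) (fuel : Nat) (i ans : Int)
    (hfuel : (n - i).toNat < fuel)
    (hvals : ∀ k, i ≤ k → k < n → pvGet a k = 0 ∨ pvGet a k = 1) :
    pvLoopA a n fuel i ans =
      (let st := (PySem.List.pyRange i n 1).foldl (pvStepB a) (ans, 0)
       st.1 + PySem.Int.floordiv st.2 3) := by
  induction fuel generalizing i ans with
  | zero => omega
  | succ fuel ih =>
    by_cases hin : i < n
    · rw [pvLoopA, if_pos hin]
      by_cases h0 : pvGet a i = 0
      · rw [if_pos h0, PySem.List.pyRange_one_cons hin]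
        simp only [List.foldl_cons, pvStepB]
        rw [if_neg (by rw [h0]; decide), pvFloordiv_zero, add_zero]
        exact ih (i + 1) ans (by omega) (fun k hk1 hk2 => hvals k (by omega) hk2)
      · rw [if_neg h0]
        set j := pvScan a n i with hj
        have hij : i ≤ j := pvScan_ge a n i
        have hjn : j ≤ n := pvScan_le a n i (by omega)
        have hi1 : pvGet a i = 1 := by
          rcases hvals i le_rfl hin with h | h
          · exact absurd h h0
          · exact h
        have hijlt : i < j := by
          by_contra hc
          have hji : j = i := le_antisymm (by omega) hij
          by_cases hjn' : j < n
          · exact pvScan_stop a n i (by rw [← hj]; omega) (by rw [← hj, hji]; exact hi1)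
          · omega
        have hsplit : PySem.List.pyRange i n 1 =
            PySem.List.pyRange i j 1 ++ PySem.List.pyRange j n 1 :=
          PySem.List.pyRange_one_append i j n hij hjn
        rw [hsplit, List.foldl_append,
          foldl_ones a i j hij (fun k => pvScan_ones a n i k) ans 0]
        simp only [zero_add]
        by_cases hjn' : j < n
        · have hj0 : pvGet a j = 0 := by
            rcases hvals j (by omega) hjn' with h | h
            · exact h
            · exact absurd h (pvScan_stop a n i (by rw [← hj]; omega))
          have hrec := ih j (ans + PySem.Int.floordiv (j - i) 3) (by omega)
            (fun k hk1 hk2 => hvals k (by omega) hk2)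
          rw [PySem.List.pyRange_one_cons hjn'] at hrec ⊢
          simp only [List.foldl_cons, pvStepB] at hrec ⊢
          rw [if_neg (by rw [hj0]; decide)] at hrec ⊢
          rw [pvFloordiv_zero, add_zero] at hrec
          exact hrec
        · have hjn2 : j = n := le_antisymm hjn (by omega)
          rw [hjn2, PySem.List.pyRange_one_eq_nil le_rfl]
          simp only [List.foldl_nil]
          cases fuel with
          | zero => omega
          | succ f => rw [pvLoopA, if_neg (lt_irrefl n)]
    · rw [pvLoopA, if_neg hin, PySem.List.pyRange_one_eq_nil (by omega)]
      simp only [List.foldl_nil]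
      rw [pvFloordiv_zero, add_zero]

theorem case_eq (n : Int) (a : List Int)
    (hvals : ∀ k ∈ PySem.List.pyRange 1 n 1, pvGet a k = 0 ∨ pvGet a k = 1) (ans : Int) :
    pvLoopA a n (n.toNat + 1) 1 ans =
      (let st := (PySem.List.pyRange 1 n 1).foldl (pvStepB a) (ans, 0)
       st.1 + PySem.Int.floordiv st.2 3) := by
  apply loop_eq
  · omega
  · intro k hk1 hk2
    exact hvals k (PySem.List.mem_pyRange_one.mpr ⟨hk1, hk2⟩)

theorem fold_eq (test_cases : List (Int × List Int))
    (hpre : Pre_count_skip_points test_cases) (acc : List Int) :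
    test_cases.foldl (fun results case =>
      results ++ [pvLoopA case.2 case.1 (case.1.toNat + 1) 1
        (0 + (if pvGet case.2 0 = 1 then 1 else 0))]) acc =
    test_cases.foldl (fun results case =>
      results ++ [((PySem.List.pyRange 1 case.1 1).foldl (pvStepB case.2)
          ((if pvGet case.2 0 = 1 then 1 else 0), 0)).1 +
        PySem.Int.floordiv ((PySem.List.pyRange 1 case.1 1).foldl (pvStepB case.2)
          ((if pvGet case.2 0 = 1 then 1 else 0), 0)).2 3]) acc := by
  induction test_cases generalizing acc with
  | nil => rfl
  | cons c cs ih =>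
    simp only [List.foldl_cons]
    rw [case_eq c.1 c.2 (hpre c List.mem_cons_self).2.2, zero_add]
    exact ih (fun x hx => hpre x (List.mem_cons_of_mem _ hx)) _

-- ===== VERDICT (by name: the statement is the Claim_ definition above) =====
theorem count_skip_points_spec : Claim_equal_count_skip_points := by
  intro test_cases _ hpre
  unfold Spec_count_skip_points count_skip_points count_skip_points_alt
  simp only []
  exact fold_eq test_cases hpre []
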